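-- pv_equiv track=rewrite | github.com/keing1/advent-of-code-2020 | day_14/docking_data.py | calc_mem_list_from_str
-- ===== SOURCE A (Python) =====
-- import itertools
--
-- def calc_mem_list_from_str(mem_str):
-- 	x_indices = [i for i, v in enumerate(mem_str) if v == 'X']
-- 	num_x = len(x_indices)
-- 	if num_x == 0:
-- 		return [mem_str]
--
-- 	binary_lists = [[0,1]]*num_x
-- 	x_possibilities = list(itertools.product(*binary_lists))
--
-- 	final_mem_list = []
-- 	for p in x_possibilities:
-- 		last_index = -1
-- 		built_str = ''
-- 		for i, v in enumerate(x_indices):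
-- 			built_str += mem_str[last_index+1:v]
-- 			built_str += str(p[i])
-- 			last_index = v
-- 		built_str += mem_str[x_indices[-1]+1:]
-- 		final_mem_list += [built_str]
--
-- 	return final_mem_list
-- ===== SOURCE B (Python) =====
-- def calc_mem_list_from_str(mem_str):
-- 	results = ['']
-- 	for c in reversed(mem_str):
-- 		if c == 'X':
-- 			results = ['0' + t for t in results] + ['1' + t for t in results]
-- 		else:
-- 			results = [c + t for t in results]
-- 	return results
-- ===== Notes on version B (the rewrite author's own statement) =====
-- stated objective: simpler
-- what changed: A collects X positions, enumerates all 0/1 tuples with itertools.product and rebuilds each string by slicing between recorded indices; B is a single right-to-left pass over the string that maintains the list of expanded suffixes, prepending each literal character and branching each 'X' into '0' and '1'.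
import Mathlib
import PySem

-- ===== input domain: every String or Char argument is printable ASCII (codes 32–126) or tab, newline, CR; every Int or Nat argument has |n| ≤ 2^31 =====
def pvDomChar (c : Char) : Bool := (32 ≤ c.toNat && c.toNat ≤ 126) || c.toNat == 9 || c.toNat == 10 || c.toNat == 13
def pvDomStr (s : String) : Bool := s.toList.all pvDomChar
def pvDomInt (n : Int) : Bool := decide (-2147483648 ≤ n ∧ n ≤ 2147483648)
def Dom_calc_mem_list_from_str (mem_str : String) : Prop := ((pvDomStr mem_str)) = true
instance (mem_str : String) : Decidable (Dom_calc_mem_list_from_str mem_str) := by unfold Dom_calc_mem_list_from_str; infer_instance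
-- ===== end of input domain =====

-- B replaces A's itertools.product + index/slice reassembly with one right-to-left pass
-- maintaining the list of expanded suffixes, branching at each 'X' (objective: simpler).

-- ===== PORT A =====
-- p[i] is always in range in A (i enumerates x_indices, len(p) = num_x), so pyGetD is exact here
def calc_mem_list_from_str (mem_str : String) : List String :=
  let l := mem_str.toList
  let x_indices := ((PySem.List.enumerate l 0).filter (fun iv => iv.2 == 'X')).map (fun iv => iv.1)
  let num_x := x_indices.length
  if num_x = 0 then [mem_str]
  else
    let binary_lists := List.replicate num_x [(0 : Int), 1]
    let x_possibilities := binary_lists.foldl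
      (fun acc bl => acc.flatMap (fun p => bl.map (fun v => p ++ [v]))) [[]]
    let final_mem_list := x_possibilities.foldl (fun fl p =>
      let r := (PySem.List.enumerate x_indices 0).foldl
        (fun (st : Int × List Char) iv =>
          (iv.2, st.2 ++ PySem.List.slice l (some (st.1 + 1)) (some iv.2)
               ++ (PySem.Int.toStr (PySem.List.pyGetD p iv.1 0)).toList))
        (-1, [])
      fl ++ [r.2 ++ PySem.List.slice l (some (PySem.List.pyGetD x_indices (-1) 0 + 1)) none]) []
    final_mem_list.map String.ofList

-- ===== PORT B =====
def calc_mem_list_from_str_alt (mem_str : String) : List String :=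
  let results := mem_str.toList.reverse.foldl
    (fun results c =>
      if c = 'X' then results.map (fun t => '0' :: t) ++ results.map (fun t => '1' :: t)
      else results.map (fun t => c :: t)) [[]]
  results.map String.ofList

-- ===== PRECONDITION & SPEC =====
def Spec_calc_mem_list_from_str (mem_str : String) (out : List String) : Prop := out = calc_mem_list_from_str_alt mem_str
instance (mem_str : String) (out : List String) : Decidable (Spec_calc_mem_list_from_str mem_str out) := by unfold Spec_calc_mem_list_from_str; infer_instance

-- ===== CLAIM (what is proved, stated in full; the proofs are below) =====
def Claim_equal_calc_mem_list_from_str : Prop := ∀ (mem_str : String), Dom_calc_mem_list_from_str mem_str → Spec_calc_mem_list_from_str mem_str (calc_mem_list_from_str mem_str)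

-- ===== LEMMAS AND PROOFS =====

-- recursive form of B's right-to-left accumulation loop
def pvExpandB : List Char → List (List Char)
  | [] => [[]]
  | c :: cs =>
    let tails := pvExpandB cs
    if c = 'X' then tails.map (fun t => '0' :: t) ++ tails.map (fun t => '1' :: t)
    else tails.map (fun t => c :: t)

theorem pvExpandB_foldl (l : List Char) :
    l.reverse.foldl
      (fun results c =>
        if c = 'X' then results.map (fun t => '0' :: t) ++ results.map (fun t => '1' :: t)
        else results.map (fun t => c :: t)) [[]] = pvExpandB l := by
  rw [List.foldl_reverse]
  induction l with
  | nil => rfl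
  | cons c cs ih => simp only [List.foldr_cons, ih, pvExpandB]

-- '0'/'1' digit produced by str(p[i])
def pvDig (b : Int) : List Char := (PySem.Int.toStr b).toList

-- the indices of 'X' characters, counted from s
def pvXI : List Char → Int → List Int
  | [], _ => []
  | c :: cs, s => if c = 'X' then s :: pvXI cs (s + 1) else pvXI cs (s + 1)

-- number of 'X' characters
def pvNX : List Char → Nat
  | [] => 0
  | c :: cs => pvNX cs + (if c = 'X' then 1 else 0)

-- all 0/1 lists of length n, first position outermost (itertools.product order)
def pvBits : Nat → List (List Int)
  | 0 => [[]]
  | n + 1 => (pvBits n).map (fun p => (0 : Int) :: p) ++ (pvBits n).map (fun p => (1 : Int) :: p)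

-- right-nested product (reference form of the foldl in port A)
def pvProdR : List (List Int) → List (List Int)
  | [] => [[]]
  | bl :: ls => bl.flatMap (fun v => (pvProdR ls).map (fun p => v :: p))

-- substitution of the bits of p for the 'X's of l, in order
def pvSubst : List Char → List Int → List Char
  | [], _ => []
  | c :: cs, p => if c = 'X' then pvDig (p.headD 0) ++ pvSubst cs p.tail else c :: pvSubst cs p

-- A's inner loop body, woven string without the trailing slice
def pvWovNT (l : List Char) (s : Int) : List Int → List Int → List Char
  | [], _ => []
  | v :: rest, p => PySem.List.slice l (some s) (some v) ++ pvDig (p.headD 0) ++ pvWovNT l (v + 1) rest p.tail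

-- same, with the trailing slice mem_str[last+1:] folded in
def pvWov (l : List Char) (s : Int) : List Int → List Int → List Char
  | [], _ => PySem.List.slice l (some s) none
  | v :: rest, p => PySem.List.slice l (some s) (some v) ++ pvDig (p.headD 0) ++ pvWov l (v + 1) rest p.tail

theorem pvXI_filter (l : List Char) (s : Int) :
    ((PySem.List.enumerate l s).filter (fun iv => iv.2 == 'X')).map (fun iv => iv.1) = pvXI l s := by
  induction l generalizing s with
  | nil => simp [PySem.List.enumerate_nil, pvXI]
  | cons c cs ih =>
    simp only [PySem.List.enumerate_cons, List.filter_cons, pvXI]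
    by_cases h : c = 'X'
    · simp [h, ih]
    · simp [h, ih]

theorem pvXI_shift (l : List Char) (s : Int) : pvXI l (s + 1) = (pvXI l s).map (fun v => v + 1) := by
  induction l generalizing s with
  | nil => simp [pvXI]
  | cons c cs ih =>
    by_cases h : c = 'X' <;> simp [pvXI, h, ih]

theorem pvXI_ge (l : List Char) (s : Int) : ∀ v ∈ pvXI l s, s ≤ v := by
  induction l generalizing s with
  | nil => simp [pvXI]
  | cons c cs ih =>
    intro v hv
    by_cases h : c = 'X' <;> simp [pvXI, h] at hv
    · rcases hv with rfl | hv
      · omega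
      · have := ih (s + 1) v hv; omega
    · have := ih (s + 1) v hv; omega

theorem pvXI_length (l : List Char) (s : Int) : (pvXI l s).length = pvNX l := by
  induction l generalizing s with
  | nil => simp [pvXI, pvNX]
  | cons c cs ih =>
    by_cases h : c = 'X' <;> simp [pvXI, pvNX, h, ih]

theorem pvSubst_noX (l : List Char) (p : List Int) (h : pvNX l = 0) : pvSubst l p = l := by
  induction l generalizing p with
  | nil => simp [pvSubst]
  | cons c cs ih =>
    by_cases hc : c = 'X' <;> simp [pvNX, hc] at h <;> simp [pvSubst, hc, ih _ h]

-- the product foldl computes the right-nested product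
theorem pvProd_foldl (ls : List (List Int)) (acc : List (List Int)) :
    ls.foldl (fun acc bl => acc.flatMap (fun p => bl.map (fun v => p ++ [v]))) acc
      = acc.flatMap (fun pfx => (pvProdR ls).map (fun p => pfx ++ p)) := by
  induction ls generalizing acc with
  | nil => simp [pvProdR]
  | cons bl ls ih =>
    simp only [List.foldl_cons, ih, pvProdR]
    simp [List.flatMap_assoc, List.flatMap_map, List.map_flatMap, List.map_map, Function.comp_def,
      List.append_assoc]

theorem pvProdR_replicate (n : Nat) : pvProdR (List.replicate n [(0 : Int), 1]) = pvBits n := by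
  induction n with
  | zero => simp [pvProdR, pvBits]
  | succ n ih => simp [List.replicate_succ, pvProdR, pvBits, ih]

theorem pvExpand_eq (l : List Char) : pvExpandB l = (pvBits (pvNX l)).map (pvSubst l) := by
  induction l with
  | nil => simp [pvExpandB, pvNX, pvBits, pvSubst]
  | cons c cs ih =>
    by_cases hc : c = 'X'
    · simp only [pvExpandB, hc, if_pos rfl, pvNX, if_pos rfl, pvBits, ih]
      have d0 : PySem.Int.toChars (0 : Int) = ['0'] := by decide
      have d1 : PySem.Int.toChars (1 : Int) = ['1'] := by decide
      simp [pvBits, List.map_map, Function.comp_def, pvSubst, pvDig, d0, d1]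
    · simp only [pvExpandB, hc, if_neg hc, pvNX, if_neg hc, ih]
      simp [List.map_map, Function.comp_def, pvSubst, hc]

-- shift lemma: slicing (c :: cs) one step to the right is slicing cs
theorem pvWov_shift (c : Char) (cs : List Char) (idxs : List Int) (s : Int) (p : List Int)
    (hs : 0 ≤ s) (hv : ∀ v ∈ idxs, 0 ≤ v) :
    pvWov (c :: cs) (s + 1) (idxs.map (fun v => v + 1)) p = pvWov cs s idxs p := by
  induction idxs generalizing s p with
  | nil =>
    simp only [List.map_nil, pvWov]
    rw [PySem.List.slice_from (c :: cs) (by omega), PySem.List.slice_from cs hs]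
    have h1 : (s + 1).toNat = s.toNat + 1 := by omega
    simp [h1]
  | cons v rest ih =>
    have hv0 : 0 ≤ v := hv v (by simp)
    simp only [List.map_cons, pvWov]
    rw [PySem.List.slice_toNat (c :: cs) (by omega) (by omega), PySem.List.slice_toNat cs hs hv0]
    have h1 : (s + 1).toNat = s.toNat + 1 := by omega
    have h2 : (v + 1).toNat = v.toNat + 1 := by omega
    simp only [h1, h2, List.drop_succ_cons]
    rw [ih (v + 1) p.tail (by omega) (fun w hw => hv w (by simp [hw]))]
    have h3 : v.toNat + 1 - (s.toNat + 1) = v.toNat - s.toNat := by omega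
    simp [h3]

theorem pvWov_subst (l : List Char) (p : List Int) : pvWov l 0 (pvXI l 0) p = pvSubst l p := by
  induction l generalizing p with
  | nil =>
    simp only [pvXI, pvWov, pvSubst]
    rw [PySem.List.slice_from ([] : List Char) (by omega)]
    simp
  | cons c cs ih =>
    have hge := pvXI_ge cs 0
    by_cases hc : c = 'X'
    · subst hc
      simp only [pvXI, reduceIte, pvWov, pvXI_shift]
      rw [PySem.List.slice_toNat ('X' :: cs) (by omega) (by omega)]
      rw [pvWov_shift 'X' cs (pvXI cs 0) 0 p.tail (by omega) (fun v hv => hge v hv)]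
      simp [pvSubst, ih]
    · simp only [pvXI, hc, if_neg hc, reduceIte, pvWov, pvXI_shift]
      cases hx : pvXI cs 0 with
      | nil =>
        simp only [List.map_nil, pvWov]
        rw [PySem.List.slice_from (c :: cs) (by omega)]
        have h0 : pvNX cs = 0 := by
          have := pvXI_length cs 0; rw [hx] at this; simpa using this.symm
        simp [pvSubst, hc, pvSubst_noX cs p h0]
      | cons v rest =>
        have hv0 : 0 ≤ v := by have := hge v (by simp [hx]); omega
        simp only [List.map_cons, pvWov]
        rw [PySem.List.slice_toNat (c :: cs) (by omega) (by omega)]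
        have h2 : (v + 1).toNat = v.toNat + 1 := by omega
        simp only [Int.toNat_zero, List.drop_zero, h2]
        rw [pvWov_shift c cs rest (v + 1) p.tail (by omega)
          (fun w hw => by have := hge w (by simp [hx, hw]); omega)]
        have hsub : pvSubst (c :: cs) p = c :: pvSubst cs p := by simp [pvSubst, hc]
        rw [hsub, ← ih p, hx]
        simp only [pvWov]
        rw [PySem.List.slice_toNat cs (by omega) hv0]
        simp [List.take_succ_cons]

-- A's inner foldl over enumerate(x_indices) computes pvWovNT
theorem pvFold_wovNT (l : List Char) (p : List Int) (idxs : List Int) (i0 : Nat) (last : Int) (built : List Char) :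
    (PySem.List.enumerate idxs (i0 : Int)).foldl
        (fun (st : Int × List Char) iv =>
          (iv.2, st.2 ++ PySem.List.slice l (some (st.1 + 1)) (some iv.2)
               ++ (PySem.Int.toStr (PySem.List.pyGetD p iv.1 0)).toList))
        (last, built)
      = (idxs.getLastD last, built ++ pvWovNT l (last + 1) idxs (p.drop i0)) := by
  induction idxs generalizing i0 last built with
  | nil => simp [PySem.List.enumerate_nil, pvWovNT]
  | cons v rest ih =>
    simp only [PySem.List.enumerate_cons, List.foldl_cons]
    have hcast : (i0 : Int) + 1 = ((i0 + 1 : Nat) : Int) := by push_cast; ring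
    rw [hcast, ih (i0 + 1) v]
    have hhead : PySem.List.pyGetD p (i0 : Int) 0 = (p.drop i0).headD 0 := by
      rw [PySem.List.pyGetD_natCast]
      cases hp : p[i0]? with
      | none =>
        have : p.length ≤ i0 := by simpa using List.getElem?_eq_none_iff.mp hp
        simp [List.getD, hp, List.drop_eq_nil_of_le this]
      | some x => simp [List.getD, hp, List.headD_eq_head?_getD, List.head?_drop]
    have htail : (p.drop i0).tail = p.drop (i0 + 1) := by
      rw [List.tail_drop]
    simp only [pvWovNT, hhead, htail, pvDig, List.append_assoc, List.getLastD]
    cases rest <;> simp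

theorem pvWovNT_tail (l : List Char) (p : List Int) (v : Int) (rest : List Int) (s : Int) :
    pvWovNT l s (v :: rest) p ++ PySem.List.slice l (some ((v :: rest).getLast (by simp) + 1)) none
      = pvWov l s (v :: rest) p := by
  induction rest generalizing v s p with
  | nil => simp [pvWovNT, pvWov, List.getLast]
  | cons w rest ih =>
    have hg : (v :: w :: rest).getLast (by simp) = (w :: rest).getLast (by simp) := by
      simp [List.getLast_cons]
    rw [show pvWovNT l s (v :: w :: rest) p
          = PySem.List.slice l (some s) (some v) ++ pvDig (p.headD 0)
            ++ pvWovNT l (v + 1) (w :: rest) p.tail from rfl,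
        show pvWov l s (v :: w :: rest) p
          = PySem.List.slice l (some s) (some v) ++ pvDig (p.headD 0)
            ++ pvWov l (v + 1) (w :: rest) p.tail from rfl]
    simp only [List.append_assoc]
    rw [hg, ih p.tail w (v + 1)]

-- ===== VERDICT (by name: the statement is the Claim_ definition above) =====
theorem calc_mem_list_from_str_spec : Claim_equal_calc_mem_list_from_str := by
  intro mem_str _
  unfold Spec_calc_mem_list_from_str calc_mem_list_from_str calc_mem_list_from_str_alt
  simp only [pvXI_filter, pvExpandB_foldl]
  by_cases h0 : (pvXI mem_str.toList 0).length = 0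
  · have hx : pvXI mem_str.toList 0 = [] := List.length_eq_zero_iff.mp h0
    have hnx : pvNX mem_str.toList = 0 := by
      have := pvXI_length mem_str.toList 0; rw [hx] at this; simpa using this.symm
    rw [if_pos h0, pvExpand_eq, hnx]
    simp [pvBits, pvSubst_noX _ [] hnx]
  · rw [if_neg h0, pvProd_foldl, pvProdR_replicate, pvExpand_eq, ← pvXI_length mem_str.toList 0]
    simp only [List.flatMap_cons, List.flatMap_nil, List.nil_append, List.append_nil,
      List.map_id_fun', id]
    rw [PySem.List.foldl_append_singleton_eq_map
      (fun p => (List.foldl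
          (fun (st : Int × List Char) iv =>
            (iv.2, st.2 ++ PySem.List.slice mem_str.toList (some (st.1 + 1)) (some iv.2)
                 ++ (PySem.Int.toStr (PySem.List.pyGetD p iv.1 0)).toList))
          (-1, []) (PySem.List.enumerate (pvXI mem_str.toList 0) 0)).2
        ++ PySem.List.slice mem_str.toList
            (some (PySem.List.pyGetD (pvXI mem_str.toList 0) (-1) 0 + 1)) none)]
    simp only [List.nil_append, List.map_map]
    apply List.map_congr_left
    intro p _
    cases hx : pvXI mem_str.toList 0 with
    | nil => exact absurd (by simp [hx]) h0
    | cons v rest =>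
      have hfold := pvFold_wovNT mem_str.toList p (v :: rest) 0 (-1) []
      simp only [Nat.cast_zero, List.drop_zero] at hfold
      simp only [Function.comp_apply, hfold, List.nil_append, neg_add_cancel]
      rw [PySem.List.pyGetD_neg_one (v :: rest) 0 (by simp), pvWovNT_tail, ← hx, pvWov_subst]
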